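-- pv_equiv track=rewrite | github.com/joeyshi12/coding-problems | misc/valid_time_series/soln.py | is_valid_time_series
-- ===== SOURCE A (Python) =====
-- def is_valid_time_series(grid: list[list[int]]) -> bool:
--     n = len(grid[0])
--     for row_index in range(1, len(grid)):
--         row1 = grid[row_index - 1]
--         row2 = grid[row_index]
--         if sum(row1) != sum(row2):
--             return False
--         i, j = 0, 0
--         while i < n or j < n:
--             if i < n and j < n and row1[i] == 1 and row2[j] == 1:
--                 if abs(i - j) > 1:
--                     return False
--                 i += 1
--                 j += 1
--                 continue
--             if i < n and row1[i] == 0: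
--                 i += 1
--             if j < n and row2[j] == 0:
--                 j += 1
--     return True
-- ===== SOURCE B (Python) =====
-- def is_valid_time_series(grid: list[list[int]]) -> bool:
--     for row1, row2 in zip(grid, grid[1:]):
--         if sum(row1) != sum(row2):
--             return False
--         ones1 = [i for i, v in enumerate(row1) if v == 1]
--         ones2 = [j for j, v in enumerate(row2) if v == 1]
--         for a, b in zip(ones1, ones2):
--             if abs(a - b) > 1:
--                 return False
--     return True
-- ===== Notes on version B (the rewrite author's own statement) =====
-- stated objective: simpler
-- what changed: A's interleaved two-pointer skip-zeros while-loop per row pair is replaced by building the index lists of 1-positions once per row and comparing them pairwise with zip.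
-- outside the precondition, e.g. on is_valid_time_series([[0, 0, 1, 5], [1, 5, 0, 0]]): A returns False, B returns False
import Mathlib
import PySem

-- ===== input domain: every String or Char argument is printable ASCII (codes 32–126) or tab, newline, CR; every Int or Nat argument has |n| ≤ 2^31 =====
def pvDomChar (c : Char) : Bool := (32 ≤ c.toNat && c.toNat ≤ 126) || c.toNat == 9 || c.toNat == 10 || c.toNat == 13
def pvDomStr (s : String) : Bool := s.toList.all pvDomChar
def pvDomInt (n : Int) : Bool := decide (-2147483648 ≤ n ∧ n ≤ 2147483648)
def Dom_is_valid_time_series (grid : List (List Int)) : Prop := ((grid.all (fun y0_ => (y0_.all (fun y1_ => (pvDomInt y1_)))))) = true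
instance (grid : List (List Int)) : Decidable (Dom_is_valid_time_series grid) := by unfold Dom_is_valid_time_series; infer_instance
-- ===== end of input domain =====

-- B replaces A's two-pointer skip-zeros scan per row pair by building the lists of
-- 1-positions and comparing them pairwise (simpler; same asymptotic cost).

-- ===== PORT A =====
-- A's inner while-loop, modelled with fuel: under Pre_ every iteration advances i+j,
-- so fuel 2*n+1 is never exhausted (the `true` at fuel 0 is unreachable under Pre_;
-- in Python the loop can diverge only on inputs Pre_ excludes).
-- Row indexing uses List.getD: under Pre_ both rows have length n and i,j < n at
-- every access, so it is exact (Python's row1[i]).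
def pvScanA (n : Nat) (r1 r2 : List Int) : Nat → Nat → Nat → Bool
  | 0, _, _ => true
  | fuel+1, i, j =>
    if i < n ∨ j < n then
      if i < n ∧ j < n ∧ r1.getD i 0 = 1 ∧ r2.getD j 0 = 1 then
        if 1 < ((i : Int) - (j : Int)).natAbs then false
        else pvScanA n r1 r2 fuel (i+1) (j+1)
      else
        pvScanA n r1 r2 fuel
          (if i < n ∧ r1.getD i 0 = 0 then i+1 else i)
          (if j < n ∧ r2.getD j 0 = 0 then j+1 else j)
    else true

-- A's for-loop over row_index in range(1, len(grid)), as recursion over adjacent rows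
def pvRowsA (n : Nat) : List (List Int) → Bool
  | r1 :: r2 :: rest =>
    if r1.sum ≠ r2.sum then false
    else if pvScanA n r1 r2 (2*n+1) 0 0 then pvRowsA n (r2 :: rest) else false
  | _ => true

-- n = len(grid[0]); Pre_ excludes the empty grid, on which Python raises IndexError
def is_valid_time_series (grid : List (List Int)) : Bool :=
  pvRowsA (grid.headD []).length grid

-- ===== PORT B =====
-- [i for i, v in enumerate(row) if v == 1]
def pvOnes (r : List Int) : List Int :=
  ((PySem.List.enumerate r 0).filter (fun p => p.2 == 1)).map (fun p => p.1)

-- the inner for-loop over zip(ones1, ones2) with early return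
def pvPairsOK : List (Int × Int) → Bool
  | [] => true
  | (a, b) :: rest => if 1 < (a - b).natAbs then false else pvPairsOK rest

-- the outer for-loop over zip(grid, grid[1:]) with early returns
def pvRowsB : List (List Int × List Int) → Bool
  | [] => true
  | (r1, r2) :: rest =>
    if r1.sum ≠ r2.sum then false
    else if pvPairsOK ((pvOnes r1).zip (pvOnes r2)) then pvRowsB rest else false

-- grid[1:] = grid.tail (exact: slice from 1 of a list)
def is_valid_time_series_alt (grid : List (List Int)) : Bool :=
  pvRowsB (grid.zip grid.tail)

-- ===== PRECONDITION & SPEC =====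
-- Pre_ excludes: the empty grid (A raises IndexError on grid[0]); and grids in which
-- some adjacent row pair that A's loop actually scans (all earlier pairs have equal
-- sums, and its own sums are equal) is ragged or contains an entry other than 0/1 —
-- there A's scan can raise IndexError or loop forever (where it still returns, via the
-- abs(i-j) > 1 branch, B returns the same value — see cites). Pairs hidden behind an
-- earlier sum mismatch, and sum-mismatched pairs themselves, are admitted in any shape.
-- shape check for the adjacent pair at index k: either it is unreachable (an earlier
-- pair has unequal sums), or it is itself decided by unequal sums, or both its rows
-- have the width of row 0 and only 0/1 entries
def pvShapeOK (grid : List (List Int)) (k : Nat) : Bool :=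
  !((List.range k).all (fun m => (grid.getD m []).sum == (grid.getD (m+1) []).sum)) ||
  (grid.getD k []).sum != (grid.getD (k+1) []).sum ||
  ((grid.getD k []).length == (grid.headD []).length &&
   (grid.getD (k+1) []).length == (grid.headD []).length &&
   (grid.getD k []).all (fun v => v == 0 || v == 1) &&
   (grid.getD (k+1) []).all (fun v => v == 0 || v == 1))

def Pre_is_valid_time_series (grid : List (List Int)) : Prop :=
  grid ≠ [] ∧ ∀ k < grid.length - 1, pvShapeOK grid k = true
instance (grid : List (List Int)) : Decidable (Pre_is_valid_time_series grid) := by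
  unfold Pre_is_valid_time_series; infer_instance

def pvWitness_is_valid_time_series : List (List Int) := [[1, 0], [0, 1]]

def Spec_is_valid_time_series (grid : List (List Int)) (out : Bool) : Prop :=
  out = is_valid_time_series_alt grid
instance (grid : List (List Int)) (out : Bool) : Decidable (Spec_is_valid_time_series grid out) := by
  unfold Spec_is_valid_time_series; infer_instance

-- ===== CLAIM (what is proved, stated in full; the proofs are below) =====
def Claim_equal_is_valid_time_series : Prop :=
  ∀ (grid : List (List Int)), Dom_is_valid_time_series grid →
    Pre_is_valid_time_series grid →
    Spec_is_valid_time_series grid (is_valid_time_series grid)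

-- ===== LEMMAS AND PROOFS =====

-- 1-positions of r, counting from k (structural form of pvOnes)
def pvOnesL : List Int → Int → List Int
  | [], _ => []
  | v :: t, k => if v = 1 then k :: pvOnesL t (k+1) else pvOnesL t (k+1)

-- 1-positions of r at indices ≥ i (state abstraction for A's pointers)
def pvOnesFrom (r : List Int) (i : Nat) : List Int := pvOnesL (r.drop i) (i : Int)

lemma pvOnes_eq_onesL (r : List Int) : ∀ k, ((PySem.List.enumerate r k).filter
    (fun p => p.2 == 1)).map (fun p => p.1) = pvOnesL r k := by
  induction r with
  | nil => intro k; simp [pvOnesL]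
  | cons v t ih =>
    intro k
    by_cases h : v = 1 <;>
      simp [PySem.List.enumerate_cons, pvOnesL, h, ih]

lemma sum_eq_onesL_length (r : List Int) (hb : ∀ v ∈ r, v = 0 ∨ v = 1) :
    ∀ k, r.sum = ((pvOnesL r k).length : Int) := by
  induction r with
  | nil => intro k; simp [pvOnesL]
  | cons v t ih =>
    intro k
    have ih' := ih (fun v hv => hb v (List.mem_cons_of_mem _ hv))
    have e : pvOnesL (v :: t) k = if v = 1 then k :: pvOnesL t (k+1) else pvOnesL t (k+1) := rfl
    rcases hb v (by simp) with h | h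
    · subst h; rw [List.sum_cons, zero_add, e, if_neg (by norm_num), ih' (k+1)]
    · subst h; rw [List.sum_cons, e, if_pos rfl, List.length_cons, ih' (k+1)]
      push_cast; ring

lemma pvOnesFrom_of_ge (r : List Int) (i : Nat) (h : r.length ≤ i) :
    pvOnesFrom r i = [] := by
  simp [pvOnesFrom, List.drop_eq_nil_of_le h, pvOnesL]

lemma pvOnesFrom_of_lt (r : List Int) (i : Nat) (h : i < r.length) :
    pvOnesFrom r i =
      if r[i]?.getD 0 = 1 then (i : Int) :: pvOnesFrom r (i+1) else pvOnesFrom r (i+1) := by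
  have hd : r.drop i = r[i] :: r.drop (i+1) := List.drop_eq_getElem_cons h
  rw [List.getElem?_eq_getElem h, Option.getD_some]
  unfold pvOnesFrom
  rw [hd]
  by_cases h1 : r[i] = 1
  · rw [if_pos h1]
    show pvOnesL (r[i] :: r.drop (i+1)) (i : Int) = _
    rw [pvOnesL, if_pos h1]
    norm_num
  · rw [if_neg h1]
    show pvOnesL (r[i] :: r.drop (i+1)) (i : Int) = _
    rw [pvOnesL, if_neg h1]
    norm_num

lemma scan_eq (n : Nat) (r1 r2 : List Int) (h1 : r1.length = n) (h2 : r2.length = n)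
    (b1 : ∀ v ∈ r1, v = 0 ∨ v = 1) (b2 : ∀ v ∈ r2, v = 0 ∨ v = 1) :
    ∀ fuel i j, (pvOnesFrom r1 i).length = (pvOnesFrom r2 j).length →
      (n - i) + (n - j) < fuel →
      pvScanA n r1 r2 fuel i j = pvPairsOK ((pvOnesFrom r1 i).zip (pvOnesFrom r2 j)) := by
  intro fuel
  induction fuel with
  | zero => intro i j _ hf; omega
  | succ fuel ih =>
    intro i j hlen hf
    by_cases hi : i < n
    · have hv1 : r1[i]?.getD 0 = 0 ∨ r1[i]?.getD 0 = 1 := by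
        rw [List.getElem?_eq_getElem (show i < r1.length by omega), Option.getD_some]
        exact b1 _ (List.getElem_mem _)
      by_cases hj : j < n
      · have hv2 : r2[j]?.getD 0 = 0 ∨ r2[j]?.getD 0 = 1 := by
          rw [List.getElem?_eq_getElem (show j < r2.length by omega), Option.getD_some]
          exact b2 _ (List.getElem_mem _)
        rcases hv1 with h1v | h1v <;> rcases hv2 with h2v | h2v
        · -- both zeros: both pointers advance, both ones-lists unchanged
          have e1 := pvOnesFrom_of_lt r1 i (by omega)
          have e2 := pvOnesFrom_of_lt r2 j (by omega)
          rw [h1v] at e1; rw [h2v] at e2; norm_num at e1 e2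
          rw [pvScanA, if_pos (Or.inl hi), if_neg (by simp [h1v]),
            if_pos (⟨hi, h1v⟩ : i < n ∧ r1.getD i 0 = 0),
            if_pos (⟨hj, h2v⟩ : j < n ∧ r2.getD j 0 = 0),
            ih (i+1) (j+1) (by rw [← e1, ← e2]; exact hlen) (by omega), e1, e2]
        · -- r1[i]=0, r2[j]=1: only i advances
          have e1 := pvOnesFrom_of_lt r1 i (by omega)
          rw [h1v] at e1; norm_num at e1
          rw [pvScanA, if_pos (Or.inl hi), if_neg (by simp [h1v]),
            if_pos (⟨hi, h1v⟩ : i < n ∧ r1.getD i 0 = 0),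
            if_neg (by simp [h2v] : ¬(j < n ∧ r2.getD j 0 = 0)),
            ih (i+1) j (by rw [← e1]; exact hlen) (by omega), e1]
        · -- r1[i]=1, r2[j]=0: only j advances
          have e2 := pvOnesFrom_of_lt r2 j (by omega)
          rw [h2v] at e2; norm_num at e2
          rw [pvScanA, if_pos (Or.inl hi), if_neg (by simp [h2v]),
            if_neg (by simp [h1v] : ¬(i < n ∧ r1.getD i 0 = 0)),
            if_pos (⟨hj, h2v⟩ : j < n ∧ r2.getD j 0 = 0),
            ih i (j+1) (by rw [← e2]; exact hlen) (by omega), e2]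
        · -- both ones: the matching branch
          have e1 := pvOnesFrom_of_lt r1 i (by omega)
          have e2 := pvOnesFrom_of_lt r2 j (by omega)
          rw [h1v] at e1; rw [h2v] at e2; norm_num at e1 e2
          rw [pvScanA, if_pos (Or.inl hi),
            if_pos (⟨hi, hj, h1v, h2v⟩ :
              i < n ∧ j < n ∧ r1.getD i 0 = 1 ∧ r2.getD j 0 = 1), e1, e2]
          by_cases habs : 1 < ((i : Int) - (j : Int)).natAbs
          · rw [if_pos habs]; simp [pvPairsOK, habs]
          · rw [if_neg habs,
              ih (i+1) (j+1) (by rw [e1, e2] at hlen; simpa using hlen) (by omega)]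
            simp [pvPairsOK, habs]
      · -- i < n, j ≥ n: ones2 is empty, hence so is ones1, hence r1[i] = 0
        have e2 : pvOnesFrom r2 j = [] := pvOnesFrom_of_ge r2 j (by omega)
        have e1e : pvOnesFrom r1 i = [] := by
          rw [e2] at hlen; exact List.eq_nil_of_length_eq_zero hlen
        have h1v : r1[i]?.getD 0 = 0 := by
          rcases hv1 with h | h
          · exact h
          · exfalso
            have := pvOnesFrom_of_lt r1 i (by omega)
            rw [h, e1e] at this; simp at this
        have e1 := pvOnesFrom_of_lt r1 i (by omega)
        rw [h1v] at e1; norm_num at e1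
        rw [pvScanA, if_pos (Or.inl hi), if_neg (by simp [h1v]),
          if_pos (⟨hi, h1v⟩ : i < n ∧ r1.getD i 0 = 0),
          if_neg (by simp [hj] : ¬(j < n ∧ r2.getD j 0 = 0)),
          ih (i+1) j (by rw [← e1]; exact hlen) (by omega), e1]
    · by_cases hj : j < n
      · -- i ≥ n, j < n: symmetric, r2[j] = 0
        have hv2 : r2[j]?.getD 0 = 0 ∨ r2[j]?.getD 0 = 1 := by
          rw [List.getElem?_eq_getElem (show j < r2.length by omega), Option.getD_some]
          exact b2 _ (List.getElem_mem _)
        have e1 : pvOnesFrom r1 i = [] := pvOnesFrom_of_ge r1 i (by omega)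
        have e2e : pvOnesFrom r2 j = [] := by
          rw [e1] at hlen; exact List.eq_nil_of_length_eq_zero hlen.symm
        have h2v : r2[j]?.getD 0 = 0 := by
          rcases hv2 with h | h
          · exact h
          · exfalso
            have := pvOnesFrom_of_lt r2 j (by omega)
            rw [h, e2e] at this; simp at this
        have e2 := pvOnesFrom_of_lt r2 j (by omega)
        rw [h2v] at e2; norm_num at e2
        rw [pvScanA, if_pos (Or.inr hj), if_neg (by simp [hi]),
          if_neg (by simp [hi] : ¬(i < n ∧ r1.getD i 0 = 0)),
          if_pos (⟨hj, h2v⟩ : j < n ∧ r2.getD j 0 = 0),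
          ih i (j+1) (by rw [← e2]; exact hlen) (by omega), e2]
      · -- both done
        rw [pvScanA, if_neg (by omega)]
        rw [pvOnesFrom_of_ge r1 i (by omega), pvOnesFrom_of_ge r2 j (by omega)]
        simp [pvPairsOK]

-- the reachable-pair shape condition of Pre_, with the reference width n made explicit
def pvGood (n : Nat) (grid : List (List Int)) : Prop :=
  ∀ k : Nat, k + 1 < grid.length →
    (∀ m : Nat, m < k → (grid.getD m []).sum = (grid.getD (m+1) []).sum) →
    (grid.getD k []).sum = (grid.getD (k+1) []).sum →
    ((grid.getD k []).length = n ∧ (grid.getD (k+1) []).length = n ∧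
     (∀ v ∈ grid.getD k [], v = 0 ∨ v = 1) ∧ (∀ v ∈ grid.getD (k+1) [], v = 0 ∨ v = 1))

lemma pvGood_tail (n : Nat) (r1 r2 : List Int) (rest : List (List Int))
    (h : pvGood n (r1 :: r2 :: rest)) (hs : r1.sum = r2.sum) : pvGood n (r2 :: rest) := by
  intro k hk hprev hsk
  have hq := h (k+1) (by simp at hk ⊢; omega)
    (fun m hm => by
      cases m with
      | zero => simpa using hs
      | succ m' => simpa [List.getD_cons_succ] using hprev m' (by omega))
    (by simpa [List.getD_cons_succ] using hsk)
  simpa [List.getD_cons_succ] using hq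

lemma pvShapeOK_spec (grid : List (List Int)) (k : Nat)
    (h : pvShapeOK grid k = true)
    (hprev : ∀ m : Nat, m < k → (grid.getD m []).sum = (grid.getD (m+1) []).sum)
    (hsk : (grid.getD k []).sum = (grid.getD (k+1) []).sum) :
    (grid.getD k []).length = (grid.headD []).length ∧
    (grid.getD (k+1) []).length = (grid.headD []).length ∧
    (∀ v ∈ grid.getD k [], v = 0 ∨ v = 1) ∧
    (∀ v ∈ grid.getD (k+1) [], v = 0 ∨ v = 1) := by
  have hall : ((List.range k).all
      (fun m => (grid.getD m []).sum == (grid.getD (m+1) []).sum)) = true := by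
    simp only [List.all_eq_true, List.mem_range, beq_iff_eq]
    exact fun m hm => hprev m hm
  simp only [pvShapeOK, hall, hsk, Bool.not_true, Bool.false_or, bne_self_eq_false,
    Bool.and_eq_true, List.all_eq_true, beq_iff_eq] at h
  refine ⟨h.1.1.1, h.1.1.2, fun v hv => ?_, fun v hv => ?_⟩
  · have := h.1.2 v hv; simpa using this
  · have := h.2 v hv; simpa using this

lemma rows_eq (n : Nat) : ∀ grid : List (List Int), pvGood n grid →
    pvRowsA n grid = pvRowsB (grid.zip grid.tail) := by
  intro grid
  induction grid with
  | nil => intro _; simp [pvRowsA, pvRowsB]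
  | cons r1 rest ih =>
    intro hgood
    cases rest with
    | nil => simp [pvRowsA, pvRowsB]
    | cons r2 rest' =>
      show pvRowsA n (r1 :: r2 :: rest') = pvRowsB ((r1, r2) :: (r2 :: rest').zip rest')
      by_cases hs : r1.sum = r2.sum
      · have h0 := hgood 0 (by simp) (fun m hm => absurd hm (Nat.not_lt_zero m))
          (by simpa using hs)
        simp only [List.getD_cons_zero, List.getD_cons_succ] at h0
        obtain ⟨h1, h2, b1, b2⟩ := h0
        have hlens : (pvOnesFrom r1 0).length = (pvOnesFrom r2 0).length := by
          have := (sum_eq_onesL_length r1 b1 0).symm.trans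
            (hs.trans (sum_eq_onesL_length r2 b2 0))
          simpa [pvOnesFrom] using Int.ofNat_inj.mp this
        have hscan := scan_eq n r1 r2 h1 h2 b1 b2 (2*n+1) 0 0 hlens (by omega)
        have hones1 : pvOnes r1 = pvOnesFrom r1 0 := by
          simp [pvOnes, pvOnes_eq_onesL, pvOnesFrom]
        have hones2 : pvOnes r2 = pvOnesFrom r2 0 := by
          simp [pvOnes, pvOnes_eq_onesL, pvOnesFrom]
        rw [pvRowsA, pvRowsB,
          if_neg (not_not_intro hs : ¬(r1.sum ≠ r2.sum)),
          if_neg (not_not_intro hs : ¬(r1.sum ≠ r2.sum)), hscan, hones1, hones2]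
        cases hp : pvPairsOK ((pvOnesFrom r1 0).zip (pvOnesFrom r2 0)) with
        | false => simp
        | true =>
          simp only [if_true]
          exact ih (pvGood_tail n r1 r2 rest' hgood hs)
      · rw [pvRowsA, pvRowsB, if_pos (hs : r1.sum ≠ r2.sum), if_pos (hs : r1.sum ≠ r2.sum)]

-- ===== VERDICT (by name: the statement is the Claim_ definition above) =====
theorem is_valid_time_series_spec : Claim_equal_is_valid_time_series := by
  intro grid _ hpre
  obtain ⟨hne, hP⟩ := hpre
  show is_valid_time_series grid = is_valid_time_series_alt grid
  unfold is_valid_time_series is_valid_time_series_alt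
  exact rows_eq (grid.headD []).length grid
    (fun k hk hprev hsk => pvShapeOK_spec grid k (hP k (by omega)) hprev hsk)
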